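-- pv_equiv track=rewrite | github.com/Chickaboo/magic_midi | training/ddp_common.py | _resolve_rope_heads
-- ===== SOURCE A (Python) =====
-- def _resolve_divisible_heads(width: int, requested_heads: int) -> int:
--     heads = max(1, min(int(requested_heads), int(width)))
--     while heads > 1 and (int(width) % heads) != 0:
--         heads -= 1
--     return max(1, heads)
--
-- def _resolve_rope_heads(width: int, requested_heads: int) -> int:
--     heads = _resolve_divisible_heads(width, requested_heads)
--     while heads > 1:
--         head_dim = int(width) // int(heads)
--         if head_dim % 2 == 0:
--             return int(heads)
--         heads -= 1
--         while heads > 1 and (int(width) % heads) != 0: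
--             heads -= 1
--     return 1
-- ===== SOURCE B (Python) =====
-- def _resolve_rope_heads(width: int, requested_heads: int) -> int:
--     w = int(width)
--     cap = max(1, min(int(requested_heads), w))
--     best = 1
--     i = 1
--     while i * i <= w:
--         if w % i == 0:
--             for d in (i, w // i):
--                 if d <= cap and (w // d) % 2 == 0 and d > best:
--                     best = d
--         i += 1
--     return best
-- ===== Notes on version B (the rewrite author's own statement) =====
-- stated objective: faster
-- what changed: Replaced A's descending linear scan over candidate head counts by an ascending enumeration of divisor pairs (i, width//i) up to sqrt(width), keeping the largest divisor <= cap with even quotient.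
import Mathlib
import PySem

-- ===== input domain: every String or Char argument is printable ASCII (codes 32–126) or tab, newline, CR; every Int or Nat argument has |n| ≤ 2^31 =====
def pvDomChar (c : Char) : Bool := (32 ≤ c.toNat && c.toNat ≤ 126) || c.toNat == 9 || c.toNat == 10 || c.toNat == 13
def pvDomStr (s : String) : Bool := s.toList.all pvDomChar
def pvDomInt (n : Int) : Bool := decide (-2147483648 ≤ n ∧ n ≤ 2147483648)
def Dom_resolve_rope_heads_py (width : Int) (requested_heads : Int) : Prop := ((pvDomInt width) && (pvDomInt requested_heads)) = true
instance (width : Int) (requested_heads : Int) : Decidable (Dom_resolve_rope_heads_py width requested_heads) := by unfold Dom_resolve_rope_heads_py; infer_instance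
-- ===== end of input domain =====

-- B replaces A's descending linear scan by an enumeration of divisor pairs up to √width (objective: faster).
-- Loops are ported with a Nat fuel that bounds the remaining iterations (the fuel is always sufficient; the proofs show it).

-- ===== PORT A =====
-- inner while-loop of _resolve_divisible_heads: decrement heads while heads > 1 and width % heads != 0
def pvRdhAux (width : Int) : Nat → Int → Int
  | 0, heads => heads
  | fuel + 1, heads =>
    if 1 < heads ∧ PySem.Int.mod width heads ≠ 0 then pvRdhAux width fuel (heads - 1) else heads

def pvResolveDivisibleHeads (width : Int) (requested_heads : Int) : Int :=
  max 1 (pvRdhAux width (max 1 (min requested_heads width)).toNat (max 1 (min requested_heads width)))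

-- outer while-loop of _resolve_rope_heads (each pass re-runs the divisor-skipping inner loop)
def pvRrhAux (width : Int) : Nat → Int → Int
  | 0, _ => 1
  | fuel + 1, heads =>
    if 1 < heads then
      if PySem.Int.mod (PySem.Int.floordiv width heads) 2 = 0 then heads
      else pvRrhAux width fuel (pvRdhAux width (heads - 1).toNat (heads - 1))
    else 1

def resolve_rope_heads_py (width : Int) (requested_heads : Int) : Int :=
  pvRrhAux width (pvResolveDivisibleHeads width requested_heads).toNat
    (pvResolveDivisibleHeads width requested_heads)

-- ===== PORT B =====
-- body of B's inner 'for d in (i, w // i)' loop: keep d if it qualifies and beats best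
def pvStep (w : Int) (cap : Int) (d : Int) (b : Int) : Int :=
  if d ≤ cap ∧ PySem.Int.mod (PySem.Int.floordiv w d) 2 = 0 ∧ b < d then d else b

-- B's while-loop: i ascends while i*i <= w, testing the divisor pair (i, w // i)
def pvBAux (w : Int) (cap : Int) : Nat → Int → Int → Int
  | 0, _, best => best
  | fuel + 1, i, best =>
    if i * i ≤ w then
      pvBAux w cap fuel (i + 1)
        (if PySem.Int.mod w i = 0 then pvStep w cap (PySem.Int.floordiv w i) (pvStep w cap i best)
         else best)
    else best

def resolve_rope_heads_py_alt (width : Int) (requested_heads : Int) : Int :=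
  pvBAux width (max 1 (min requested_heads width)) width.toNat 1 1

-- ===== PRECONDITION & SPEC =====
def Spec_resolve_rope_heads_py (width : Int) (requested_heads : Int) (out : Int) : Prop := out = resolve_rope_heads_py_alt width requested_heads
instance (width : Int) (requested_heads : Int) (out : Int) : Decidable (Spec_resolve_rope_heads_py width requested_heads out) := by unfold Spec_resolve_rope_heads_py; infer_instance

-- ===== CLAIM (what is proved, stated in full; the proofs are below) =====
def Claim_equal_resolve_rope_heads_py : Prop := ∀ (width : Int) (requested_heads : Int), Dom_resolve_rope_heads_py width requested_heads → Spec_resolve_rope_heads_py width requested_heads (resolve_rope_heads_py width requested_heads)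

-- ===== LEMMAS AND PROOFS =====

-- reference function: greatest d with 1 < d ≤ c, d ∣ w and even quotient, else 1 (descending search)
def pvG (w : Int) (c : Int) : Int :=
  if h : 1 < c then
    if w % c = 0 ∧ (w / c) % 2 = 0 then c else pvG w (c - 1)
  else 1
termination_by c.toNat
decreasing_by omega

-- the "good candidate" predicate
def pvP (w c d : Int) : Prop := 1 < d ∧ d ≤ c ∧ w % d = 0 ∧ (w / d) % 2 = 0

theorem pvRdhAux_pos (width : Int) : ∀ (f : Nat) (heads : Int), 1 ≤ heads →
    1 ≤ pvRdhAux width f heads := by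
  intro f
  induction f with
  | zero => intro h hh; exact hh
  | succ n ih =>
    intro h hh
    simp only [pvRdhAux]
    split
    · rename_i hc; exact ih (h - 1) (by omega)
    · exact hh

-- the inner loop stops only at 1 (or below) or at a divisor: its result is stable
theorem pvRdhAux_stop (width : Int) : ∀ (f : Nat) (heads : Int), heads.toNat ≤ f →
    ¬ (1 < pvRdhAux width f heads ∧ PySem.Int.mod width (pvRdhAux width f heads) ≠ 0) := by
  intro f
  induction f with
  | zero => intro h hf; simp only [pvRdhAux]; omega
  | succ n ih =>
    intro h hf
    simp only [pvRdhAux]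
    split
    · rename_i hc; exact ih (h - 1) (by omega)
    · rename_i hc; exact hc

theorem pvRdhAux_stable (width x : Int)
    (hx : ¬ (1 < x ∧ PySem.Int.mod width x ≠ 0)) : pvRdhAux width x.toNat x = x := by
  cases hx' : x.toNat with
  | zero => simp only [pvRdhAux]
  | succ t => simp only [pvRdhAux, if_neg hx]

-- A's outer loop, started at an inner-loop fixpoint, computes the descending reference search
theorem pvA_eq_G (w : Int) : ∀ (k : Nat) (h : Int) (f : Nat), h.toNat ≤ k → h.toNat ≤ f →
    pvRrhAux w f (pvRdhAux w h.toNat h) = pvG w h := by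
  intro k
  induction k with
  | zero =>
    intro h f hk hf
    have h1 : ¬ 1 < h := by omega
    have hh0 : h.toNat = 0 := by omega
    rw [hh0]
    simp only [pvRdhAux]
    cases f with
    | zero => rw [pvG, dif_neg h1]; simp only [pvRrhAux]
    | succ g => rw [pvG, dif_neg h1]; simp only [pvRrhAux, if_neg h1]
  | succ k ih =>
    intro h f hk hf
    by_cases h1 : 1 < h
    · obtain ⟨t, ht⟩ : ∃ t, h.toNat = t + 1 := ⟨h.toNat - 1, by omega⟩
      have ht' : (h - 1).toNat = t := by omega
      by_cases hm : PySem.Int.mod w h = 0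
      · have hm' : w % h = 0 := by rwa [PySem.Int.mod_eq_emod_of_pos (by omega)] at hm
        rw [ht]
        simp only [pvRdhAux]
        rw [if_neg (by simp [hm])]
        obtain ⟨g, hg⟩ : ∃ g, f = g + 1 := ⟨f - 1, by omega⟩
        rw [hg]
        simp only [pvRrhAux]
        rw [if_pos h1]
        rw [PySem.Int.floordiv_eq_ediv_of_pos (show (0:Int) < h by omega),
          PySem.Int.mod_eq_emod_of_pos (show (0:Int) < 2 by omega)]
        by_cases he : (w / h) % 2 = 0
        · rw [if_pos he, pvG, dif_pos h1, if_pos ⟨hm', he⟩]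
        · rw [if_neg he, pvG, dif_pos h1, if_neg (by tauto)]
          exact ih (h - 1) g (by omega) (by omega)
      · have hm'' : ¬ w % h = 0 := by rwa [PySem.Int.mod_eq_emod_of_pos (by omega)] at hm
        have hG : pvG w h = pvG w (h - 1) := by
          rw [pvG, dif_pos h1, if_neg (by tauto)]
        rw [ht]
        simp only [pvRdhAux]
        rw [if_pos ⟨h1, hm⟩, hG, ← ht']
        exact ih (h - 1) f (by omega) (by omega)
    · have hh0 : pvRdhAux w h.toNat h = h := pvRdhAux_stable w h (by tauto)
      rw [hh0, pvG, dif_neg h1]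
      cases f with
      | zero => simp only [pvRrhAux]
      | succ g => simp only [pvRrhAux, if_neg h1]

-- pvG is unchanged by the inner loop's divisor-skipping
theorem pvG_rdh (w : Int) : ∀ (k : Nat) (h : Int), h.toNat ≤ k →
    pvG w (pvRdhAux w h.toNat h) = pvG w h := by
  intro k
  induction k with
  | zero =>
    intro h hk
    rw [pvRdhAux_stable w h (by omega)]
  | succ k ih =>
    intro h hk
    by_cases hc : 1 < h ∧ PySem.Int.mod w h ≠ 0
    · obtain ⟨t, ht⟩ : ∃ t, h.toNat = t + 1 := ⟨h.toNat - 1, by omega⟩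
      have ht' : (h - 1).toNat = t := by omega
      have hm'' : ¬ w % h = 0 := by
        have := hc.2
        rwa [PySem.Int.mod_eq_emod_of_pos (by omega)] at this
      have hG : pvG w h = pvG w (h - 1) := by
        rw [pvG, dif_pos hc.1, if_neg (by tauto)]
      rw [ht]
      simp only [pvRdhAux]
      rw [if_pos hc, hG, ← ht']
      exact ih (h - 1) (by omega)
    · rw [pvRdhAux_stable w h hc]

-- pvG satisfies the "greatest good candidate" characterisation
theorem pvG_spec (w : Int) : ∀ (n : Nat) (c : Int), c.toNat ≤ n →
    1 ≤ pvG w c ∧ (pvG w c = 1 ∨ pvP w c (pvG w c)) ∧ (∀ d, pvP w c d → d ≤ pvG w c) := by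
  intro n
  induction n with
  | zero =>
    intro c hn
    have h1 : ¬ 1 < c := by omega
    rw [pvG, dif_neg h1]
    exact ⟨le_refl 1, Or.inl rfl, fun d hd => by unfold pvP at hd; omega⟩
  | succ n ih =>
    intro c hn
    by_cases h1 : 1 < c
    · by_cases hc : w % c = 0 ∧ (w / c) % 2 = 0
      · rw [pvG, dif_pos h1, if_pos hc]
        exact ⟨by omega, Or.inr ⟨h1, le_refl c, hc.1, hc.2⟩, fun d hd => hd.2.1⟩
      · rw [pvG, dif_pos h1, if_neg hc]
        obtain ⟨hge, hgood, hmax⟩ := ih (c - 1) (by omega)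
        refine ⟨hge, ?_, ?_⟩
        · rcases hgood with h | h
          · exact Or.inl h
          · exact Or.inr ⟨h.1, by have := h.2.1; omega, h.2.2.1, h.2.2.2⟩
        · intro d hd
          rcases eq_or_lt_of_le hd.2.1 with heq | hlt
          · exact absurd ⟨heq ▸ hd.2.2.1, heq ▸ hd.2.2.2⟩ hc
          · exact hmax d ⟨hd.1, by omega, hd.2.2.1, hd.2.2.2⟩
    · rw [pvG, dif_neg h1]
      exact ⟨le_refl 1, Or.inl rfl, fun d hd => by unfold pvP at hd; omega⟩

-- uniqueness: anything satisfying the characterisation equals pvG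
theorem pvG_unique (w c x : Int) (hxg : x = 1 ∨ pvP w c x)
    (hxm : ∀ d, pvP w c d → d ≤ x) : x = pvG w c := by
  obtain ⟨hge, hgood, hmax⟩ := pvG_spec w c.toNat c (le_refl _)
  rcases hxg with hx | hx
  · rcases hgood with hg | hg
    · omega
    · have := hxm _ hg; have := hg.1; omega
  · have h1 := hmax x hx
    rcases hgood with hg | hg
    · have := hx.1; omega
    · have := hxm _ hg; omega

-- basic divisor facts
theorem pv_div_eq (w d : Int) (h : w % d = 0) : w = d * (w / d) := by
  have := Int.ediv_add_emod w d
  omega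

theorem pv_quot_pos (w d : Int) (hw : 1 ≤ w) (hd : 1 ≤ d) (h : w % d = 0) : 1 ≤ w / d := by
  have he := pv_div_eq w d h
  by_contra hq
  push_neg at hq
  nlinarith

-- pvStep, in terms of % and / (its divisor argument is positive at every use)
theorem pvStep_eq (w c d b : Int) (hd : 0 < d) :
    pvStep w c d b = if d ≤ c ∧ (w / d) % 2 = 0 ∧ b < d then d else b := by
  unfold pvStep
  rw [PySem.Int.floordiv_eq_ediv_of_pos hd, PySem.Int.mod_eq_emod_of_pos (by omega)]

theorem pvStep_le (w c d b : Int) : b ≤ pvStep w c d b := by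
  unfold pvStep; split <;> omega

theorem pvStep_good (w c d b : Int) (hd0 : 0 < d) (hdvd : w % d = 0) (hb : 1 ≤ b)
    (hg : b = 1 ∨ pvP w c b) : pvStep w c d b = 1 ∨ pvP w c (pvStep w c d b) := by
  rw [pvStep_eq w c d b hd0]
  split
  · rename_i hcond; exact Or.inr ⟨by omega, hcond.1, hdvd, hcond.2.1⟩
  · exact hg

theorem pvStep_ge (w c d b : Int) (hd0 : 0 < d) (hp : pvP w c d) : d ≤ pvStep w c d b := by
  rw [pvStep_eq w c d b hd0]
  split
  · omega
  · rename_i hcond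
    by_contra hbd
    exact hcond ⟨hp.2.1, hp.2.2.2, by omega⟩

-- B's ascending divisor-pair loop also computes the greatest good candidate
theorem pvBAux_spec (w c : Int) (hw : 1 ≤ w) :
    ∀ (n : Nat) (i b : Int), (w + 1 - i).toNat ≤ n → 1 ≤ i → 1 ≤ b →
      (b = 1 ∨ pvP w c b) →
      (∀ d, pvP w c d → (d < i ∨ w / d < i) → d ≤ b) →
      (pvBAux w c n i b = 1 ∨ pvP w c (pvBAux w c n i b)) ∧
        (∀ d, pvP w c d → d ≤ pvBAux w c n i b) := by
  intro n
  induction n with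
  | zero =>
    intro i b hn hi hb hgood hcov
    have h2 : i ≤ i * i := le_mul_of_one_le_left (by omega) hi
    simp only [pvBAux]
    refine ⟨hgood, fun d hd => hcov d hd ?_⟩
    by_contra hcon
    push_neg at hcon
    have he := pv_div_eq w d hd.2.2.1
    have h3 : i * i ≤ d * (w / d) := mul_le_mul hcon.1 hcon.2 (by omega) (by omega)
    have hiw : ¬ i * i ≤ w := by omega
    linarith
  | succ n ih =>
    intro i b hn hi hb hgood hcov
    by_cases hiw : i * i ≤ w
    · simp only [pvBAux]
      rw [if_pos hiw]
      have hi0 : (0:Int) < i := by omega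
      have h2 : i ≤ i * i := le_mul_of_one_le_left (by omega) hi
      have hilew : i ≤ w := by omega
      by_cases hm : PySem.Int.mod w i = 0
      · have hm' : w % i = 0 := by rwa [PySem.Int.mod_eq_emod_of_pos hi0] at hm
        rw [if_pos hm, PySem.Int.floordiv_eq_ediv_of_pos hi0]
        set q := w / i with hq
        have hq1 : 1 ≤ q := pv_quot_pos w i hw (by omega) hm'
        have hwe : w = i * q := pv_div_eq w i hm'
        have hq0 : (0:Int) < q := by omega
        have hwq : w / q = i := by
          rw [hwe, Int.mul_ediv_cancel _ (by omega : q ≠ 0)]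
        have hqdvd : w % q = 0 := by rw [hwe]; exact Int.mul_emod_left i q
        have hb1 : 1 ≤ pvStep w c i b := le_trans hb (pvStep_le w c i b)
        have hb2 : 1 ≤ pvStep w c q (pvStep w c i b) := le_trans hb1 (pvStep_le _ _ _ _)
        refine ih (i + 1) _ (by omega) (by omega) hb2 ?_ ?_
        · exact pvStep_good w c q _ hq0 hqdvd hb1
            (pvStep_good w c i b hi0 hm' hb hgood)
        · intro d hd hcase
          have hde := pv_div_eq w d hd.2.2.1
          rcases hcase with hlt | hlt
          · rcases lt_or_eq_of_le (show d ≤ i by omega) with hdi | hdi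
            · have := hcov d hd (Or.inl hdi)
              have := pvStep_le w c i b
              have := pvStep_le w c q (pvStep w c i b)
              omega
            · have := pvStep_ge w c i b hi0 (hdi ▸ hd)
              have := pvStep_le w c q (pvStep w c i b)
              omega
          · rcases lt_or_eq_of_le (show w / d ≤ i by omega) with hdi | hdi
            · have := hcov d hd (Or.inr hdi)
              have := pvStep_le w c i b
              have := pvStep_le w c q (pvStep w c i b)
              omega
            · -- w / d = i, so d = w / i = q
              have hwd : w = d * i := by rw [← hdi]; exact hde
              have h2' : i * d = i * q := by rw [mul_comm i d, ← hwd, hwe]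
              have hdq : d = q := mul_left_cancel₀ (show (i:Int) ≠ 0 by omega) h2'
              have := pvStep_ge w c q (pvStep w c i b) hq0 (hdq ▸ hd)
              omega
      · rw [if_neg hm]
        have hm'' : ¬ w % i = 0 := by rwa [PySem.Int.mod_eq_emod_of_pos hi0] at hm
        refine ih (i + 1) b (by omega) (by omega) hb hgood ?_
        intro d hd hcase
        have hde := pv_div_eq w d hd.2.2.1
        rcases hcase with hlt | hlt
        · rcases lt_or_eq_of_le (show d ≤ i by omega) with hdi | hdi
          · exact hcov d hd (Or.inl hdi)
          · exact absurd (hdi ▸ hd.2.2.1) hm''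
        · rcases lt_or_eq_of_le (show w / d ≤ i by omega) with hdi | hdi
          · exact hcov d hd (Or.inr hdi)
          · exfalso
            apply hm''
            have hwd : w = d * i := by rw [← hdi]; exact hde
            rw [hwd]
            exact Int.mul_emod_left d i
    · simp only [pvBAux]
      rw [if_neg hiw]
      refine ⟨hgood, fun d hd => hcov d hd ?_⟩
      by_contra hcon
      push_neg at hcon
      have he := pv_div_eq w d hd.2.2.1
      have h3 : i * i ≤ d * (w / d) := mul_le_mul hcon.1 hcon.2 (by omega) (by omega)
      linarith

-- ===== VERDICT (by name: the statement is the Claim_ definition above) =====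
theorem resolve_rope_heads_py_spec : Claim_equal_resolve_rope_heads_py := by
  intro w r _
  unfold Spec_resolve_rope_heads_py resolve_rope_heads_py resolve_rope_heads_py_alt
    pvResolveDivisibleHeads
  set c : Int := max 1 (min r w) with hc
  have hc1 : 1 ≤ c := by omega
  set hds : Int := pvRdhAux w c.toNat c with hhds
  have hds1 : 1 ≤ hds := pvRdhAux_pos w c.toNat c hc1
  have hmaxeq : max 1 hds = hds := max_eq_right hds1
  rw [hmaxeq]
  have hstable : pvRdhAux w hds.toNat hds = hds :=
    pvRdhAux_stable w hds (pvRdhAux_stop w c.toNat c (le_refl _))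
  have hA := pvA_eq_G w hds.toNat hds hds.toNat (le_refl _) (le_refl _)
  rw [hstable] at hA
  have hGskip : pvG w hds = pvG w c := pvG_rdh w c.toNat c (le_refl _)
  rw [hA, hGskip]
  by_cases hw : 1 ≤ w
  · have hcov0 : ∀ d, pvP w c d → (d < 1 ∨ w / d < 1) → d ≤ 1 := by
      intro d hd hcase
      have hq := pv_quot_pos w d hw (by have := hd.1; omega) hd.2.2.1
      have := hd.1
      omega
    obtain ⟨hgood, hmaxi⟩ := pvBAux_spec w c hw w.toNat 1 1 (by omega)
      (le_refl 1) (le_refl 1) (Or.inl rfl) hcov0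
    exact (pvG_unique w c _ hgood hmaxi).symm
  · have hw0 : w.toNat = 0 := by omega
    have hcw : c = 1 := by omega
    rw [hw0, hcw]
    simp only [pvBAux]
    rw [pvG, dif_neg (by omega)]
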